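-- pv_equiv track=rewrite | github.com/AGnias47/toolbox | algorithms/zion_defense_system.py | bad_emp_planner
-- ===== SOURCE A (Python) =====
-- def emp(j):
--     return 2 ** (j - 1)
--
-- def destroy_robots(x, j):
--     return min(x, emp(j))
--
-- def bad_emp_planner(robot_arrivals):
--     n = len(robot_arrivals[1:])
--     j = 1
--     while j <= n:
--         if emp(j) >= robot_arrivals[n]:
--             robots_destroyed = destroy_robots(robot_arrivals[n], n)
--             break
--         j += 1
--     else:
--         j -= 1
--         robots_destroyed = destroy_robots(robot_arrivals[n], n)
--     if n - j >= 1: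
--         robots_destroyed += bad_emp_planner(robot_arrivals[: n - j + 1])
--     return robots_destroyed
-- ===== SOURCE B (Python) =====
-- def bad_emp_planner(robot_arrivals):
--     # iterative, index-based: j computed in O(1) via bit_length, no slicing,
--     # and the EMP power 2**(n-1) is only materialised when it is the minimum
--     total = 0
--     n = len(robot_arrivals) - 1
--     while True:
--         x = robot_arrivals[n]
--         # jx = smallest j >= 1 with 2**(j-1) >= x
--         jx = 1 if x <= 1 else (x - 1).bit_length() + 1
--         if jx <= n:
--             total += x
--             j = jx
--         else:
--             total += 2 ** (n - 1)
--             j = n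
--         if n - j < 1:
--             return total
--         n -= j
-- ===== Notes on version B (the rewrite author's own statement) =====
-- stated objective: faster
-- what changed: Replaced the slice-per-segment recursion with a single index-based loop that finds each segment's j in O(1) via bit_length on the last arrival instead of A's linear doubling search, and only materialises the EMP power when it is the minimum.
-- outside the precondition, e.g. on bad_emp_planner([]): A raises IndexError, B raises IndexError; on bad_emp_planner([5]): A returns 0.5, B returns 0.5; on bad_emp_planner([0]): A returns 0, B returns 0.5
import Mathlib
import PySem

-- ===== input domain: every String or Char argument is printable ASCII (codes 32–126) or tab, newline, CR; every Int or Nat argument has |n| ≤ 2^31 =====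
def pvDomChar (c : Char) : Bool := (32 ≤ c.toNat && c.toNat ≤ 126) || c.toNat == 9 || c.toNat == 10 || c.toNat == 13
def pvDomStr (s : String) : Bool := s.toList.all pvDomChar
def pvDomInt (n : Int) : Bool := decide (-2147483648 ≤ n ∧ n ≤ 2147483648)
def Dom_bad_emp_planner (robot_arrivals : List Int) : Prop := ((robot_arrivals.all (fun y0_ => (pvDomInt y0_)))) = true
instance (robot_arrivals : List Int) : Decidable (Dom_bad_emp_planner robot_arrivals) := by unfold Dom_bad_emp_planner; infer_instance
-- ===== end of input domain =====

-- B replaces A's slice-per-segment recursion with one index-based loop that gets each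
-- segment's j in O(1) from bit_length; equivalence is proved on lists of length ≥ 2 (Pre_).

-- ===== PORT A =====
-- exact for j ≥ 1, the only arguments emp receives inside Pre_ (Python 2**(j-1))
def empA (j : Int) : Int := 2 ^ (j - 1).toNat

def destroy_robotsA (x j : Int) : Int := min x (empA j)

-- the 'while j <= n' search for j; fuel = remaining iterations; on exhaustion the
-- for-else branch does 'j -= 1'
def aFindJ (x : Int) (j : Int) : Nat → Int
  | 0 => j - 1
  | fuel + 1 => if empA j ≥ x then j else aFindJ x (j + 1) fuel

-- the recursion of A; fuel (= initial list length) only bounds the recursion depth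
def aRec : Nat → List Int → Int
  | 0, _ => 0
  | fuel + 1, robot_arrivals =>
    let n : Int := ((PySem.List.slice robot_arrivals (some 1) none).length : Int)
    let x : Int := PySem.List.pyGetD robot_arrivals n 0   -- robot_arrivals[n]; in range inside Pre_
    let j : Int := aFindJ x 1 n.toNat
    let robots_destroyed : Int := destroy_robotsA x n
    if n - j ≥ 1 then
      robots_destroyed + aRec fuel (PySem.List.slice robot_arrivals none (some (n - j + 1)))
    else robots_destroyed

def bad_emp_planner (robot_arrivals : List Int) : Int :=
  aRec robot_arrivals.length robot_arrivals

-- ===== PORT B =====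
-- B's while-True loop; fuel (= list length) only bounds the number of iterations
def bLoop : Nat → List Int → Int → Int → Int
  | 0, _, _, total => total
  | fuel + 1, robot_arrivals, n, total =>
    let x : Int := PySem.List.pyGetD robot_arrivals n 0
    -- jx = 1 if x <= 1 else (x-1).bit_length() + 1; bit_length m = log2 m + 1 for m ≥ 1
    let jx : Int := if x ≤ 1 then 1 else ((x - 1).toNat.log2 : Int) + 1 + 1
    let p : Int × Int := if jx ≤ n then (total + x, jx) else (total + 2 ^ (n - 1).toNat, n)
    if n - p.2 < 1 then p.1 else bLoop fuel robot_arrivals (n - p.2) p.1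

def bad_emp_planner_alt (robot_arrivals : List Int) : Int :=
  bLoop robot_arrivals.length robot_arrivals ((robot_arrivals.length : Int) - 1) 0

-- ===== PRECONDITION & SPEC =====
-- Pre_ excludes lists of length < 2: there A's n is 0, so it raises IndexError on [] and
-- otherwise evaluates the fractional EMP power 2**(0-1) = 0.5, generally returning a
-- float (an int only as an accident of min against 0.5).
def Pre_bad_emp_planner (robot_arrivals : List Int) : Prop := 2 ≤ robot_arrivals.length
instance (robot_arrivals : List Int) : Decidable (Pre_bad_emp_planner robot_arrivals) := by
  unfold Pre_bad_emp_planner; infer_instance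

def pvWitness_bad_emp_planner : List Int := [3, 5]

def Spec_bad_emp_planner (robot_arrivals : List Int) (out : Int) : Prop :=
  out = bad_emp_planner_alt robot_arrivals
instance (robot_arrivals : List Int) (out : Int) : Decidable (Spec_bad_emp_planner robot_arrivals out) := by
  unfold Spec_bad_emp_planner; infer_instance

-- ===== CLAIM (what is proved, stated in full; the proofs are below) =====
def Claim_equal_bad_emp_planner : Prop := ∀ (robot_arrivals : List Int), Dom_bad_emp_planner robot_arrivals → Pre_bad_emp_planner robot_arrivals → Spec_bad_emp_planner robot_arrivals (bad_emp_planner robot_arrivals)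

-- ===== LEMMAS AND PROOFS =====

-- the common per-segment j value, as a Nat (before capping at n)
def jxN (x : Int) : Nat := if x ≤ 1 then 1 else (x - 1).toNat.log2 + 2

theorem jxN_pos (x : Int) : 1 ≤ jxN x := by unfold jxN; split <;> omega

-- common mathematical form of both programs, by well-founded recursion on the index n
def specF (arr : List Int) (n : Nat) : Int :=
  let x := PySem.List.pyGetD arr (n : Int) 0
  let j := min (jxN x) n
  let capped := min x ((2 : Int) ^ (n - 1))
  if _h : 1 ≤ n - j then capped + specF arr (n - j) else capped
termination_by n
decreasing_by
  have := jxN_pos (PySem.List.pyGetD arr (n : Int) 0)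
  omega

-- characterisation of the EMP power threshold: 2^(j-1) ≥ x ↔ jxN x ≤ j (for j ≥ 1)
theorem emp_ge_iff (x j : Int) (hj : 1 ≤ j) : x ≤ empA j ↔ (jxN x : Int) ≤ j := by
  unfold empA jxN
  split
  · rename_i hx
    have h1 : (1 : Int) ≤ 2 ^ (j - 1).toNat := one_le_pow₀ (by norm_num)
    simp only [Nat.cast_one]
    omega
  · rename_i hx
    rw [not_le] at hx
    set m : Nat := (x - 1).toNat with hm
    have hxm : x = (m : Int) + 1 := by omega
    have hm1 : 1 ≤ m := by omega
    set k : Nat := (j - 1).toNat with hk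
    have hjk : j = (k : Int) + 1 := by omega
    have hpow : (((2 : Nat) ^ k : Nat) : Int) = (2 : Int) ^ k := by push_cast; ring
    have h2 : x ≤ (2 : Int) ^ k ↔ m < 2 ^ k := by
      rw [hxm, ← hpow]
      omega
    have h3 : m < 2 ^ k ↔ m.log2 < k := (Nat.log2_lt (by omega)).symm
    rw [h2, h3]
    push_cast
    omega

-- the while loop returns the capped first hit: min (max (jxN x) j0) (j0 + fuel - 1)
theorem aFindJ_eq (fuel : Nat) : ∀ (x j0 : Int), 1 ≤ j0 →
    aFindJ x j0 fuel = min (max ((jxN x : Nat) : Int) j0) (j0 + fuel - 1) := by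
  induction fuel with
  | zero =>
    intro x j0 hj0
    simp only [aFindJ]
    omega
  | succ f ih =>
    intro x j0 hj0
    simp only [aFindJ]
    split
    · rename_i h
      have := (emp_ge_iff x j0 hj0).mp h
      omega
    · rename_i h
      have hlt : j0 < (jxN x : Int) := by
        by_contra hc
        exact h ((emp_ge_iff x j0 hj0).mpr (by omega))
      rw [ih x (j0 + 1) (by omega)]
      omega

-- A's recursion on the (n+1)-prefix equals specF at index n
theorem aRec_eq (fuel : Nat) : ∀ (n : Nat) (arr : List Int), 1 ≤ n → n < arr.length →
    n + 1 ≤ fuel → aRec fuel (arr.take (n + 1)) = specF arr n := by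
  induction fuel with
  | zero => intro n arr _ _ h; omega
  | succ f ih =>
    intro n arr hn hlen hfuel
    have hlen' : (arr.take (n + 1)).length = n + 1 := by
      simp [List.length_take]; omega
    have hn' : ((PySem.List.slice (arr.take (n + 1)) (some 1) none).length : Int) = (n : Int) := by
      rw [PySem.List.slice_from_one]
      simp [List.length_tail, hlen']
    have hx : PySem.List.pyGetD (arr.take (n + 1)) ((n : Nat) : Int) 0
        = PySem.List.pyGetD arr ((n : Nat) : Int) 0 := by
      simp only [PySem.List.pyGetD_natCast]
      simp [List.getD]
    simp only [aRec, hn', hx]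
    set x := PySem.List.pyGetD arr ((n : Nat) : Int) 0 with hxdef
    have hfind : aFindJ x 1 ((n : Int)).toNat = ((min (jxN x) n : Nat) : Int) := by
      rw [show ((n : Int)).toNat = n by omega, aFindJ_eq n x 1 (by omega)]
      have := jxN_pos x
      push_cast
      omega
    rw [hfind]
    have hemp : empA (n : Int) = (2 : Int) ^ (n - 1) := by
      unfold empA
      congr 1
      omega
    rw [specF]
    simp only [destroy_robotsA, hemp, ← hxdef]
    set jN : Nat := min (jxN x) n with hjN
    have hjN1 : 1 ≤ jN := by have := jxN_pos x; omega
    by_cases hrec : 1 ≤ n - jN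
    · have hcond : (n : Int) - ((jN : Nat) : Int) ≥ 1 := by omega
      rw [if_pos hcond, dif_pos hrec]
      congr 1
      have hb : (n : Int) - ((jN : Nat) : Int) + 1 = (((n - jN + 1 : Nat) : Nat) : Int) := by
        push_cast; omega
      rw [hb, PySem.List.slice_to_natCast, List.take_take]
      rw [show min (n - jN + 1) (n + 1) = (n - jN) + 1 by omega]
      exact ih (n - jN) arr hrec (by omega) (by omega)
    · have hcond : ¬ ((n : Int) - ((jN : Nat) : Int) ≥ 1) := by omega
      rw [if_neg hcond, dif_neg hrec]

-- B's loop accumulates specF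
theorem bLoop_eq (fuel : Nat) : ∀ (n : Nat) (arr : List Int) (total : Int), 1 ≤ n →
    n ≤ fuel → bLoop fuel arr (n : Int) total = total + specF arr n := by
  induction fuel with
  | zero => intro n arr total h hf; omega
  | succ f ih =>
    intro n arr total hn hfuel
    simp only [bLoop]
    set x := PySem.List.pyGetD arr ((n : Nat) : Int) 0 with hxdef
    have hjx : (if x ≤ 1 then (1 : Int) else ((x - 1).toNat.log2 : Int) + 1 + 1)
        = ((jxN x : Nat) : Int) := by
      unfold jxN
      split
      · simp
      · push_cast; ring
    rw [hjx]
    rw [specF]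
    simp only [← hxdef]
    set jN : Nat := min (jxN x) n with hjN
    have hjx1 := jxN_pos x
    by_cases hle : ((jxN x : Nat) : Int) ≤ (n : Int)
    · have hjNv : jN = jxN x := by omega
      rw [if_pos hle]
      simp only
      have hcap : min x ((2 : Int) ^ (n - 1)) = x := by
        have h1 : x ≤ empA (n : Int) := (emp_ge_iff x (n : Int) (by omega)).mpr hle
        have hemp : empA (n : Int) = (2 : Int) ^ (n - 1) := by
          unfold empA; congr 1; omega
        rw [← hemp]
        exact min_eq_left h1
      rw [hcap]
      by_cases hstop : 1 ≤ n - jN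
      · rw [if_neg (by omega), dif_pos hstop]
        have hb : (n : Int) - ((jxN x : Nat) : Int) = (((n - jN : Nat) : Nat) : Int) := by
          omega
        rw [hb, ih (n - jN) arr (total + x) hstop (by omega)]
        ring
      · rw [if_pos (by omega), dif_neg hstop]
    · have hjNv : jN = n := by omega
      rw [if_neg hle]
      simp only
      rw [if_pos (by omega), dif_neg (by omega)]
      have hcap : min x ((2 : Int) ^ (n - 1)) = (2 : Int) ^ (n - 1) := by
        have h1 : empA (n : Int) < x := by
          by_contra hc
          exact hle ((emp_ge_iff x (n : Int) (by omega)).mp (by omega))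
        have hemp : empA (n : Int) = (2 : Int) ^ (n - 1) := by
          unfold empA; congr 1; omega
        rw [← hemp]
        exact min_eq_right (le_of_lt h1)
      rw [hcap]
      have he : ((n : Int) - 1).toNat = n - 1 := by omega
      rw [he]

-- ===== VERDICT (by name: the statement is the Claim_ definition above) =====
theorem bad_emp_planner_spec : Claim_equal_bad_emp_planner := by
  intro arr _hdom hpre
  unfold Spec_bad_emp_planner bad_emp_planner bad_emp_planner_alt
  have hL : 2 ≤ arr.length := hpre
  have h1 : arr.take ((arr.length - 1) + 1) = arr := by
    rw [show (arr.length - 1) + 1 = arr.length by omega]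
    exact List.take_length
  have hA := aRec_eq arr.length (arr.length - 1) arr (by omega) (by omega) (by omega)
  rw [h1] at hA
  have hcast : ((arr.length : Nat) : Int) - 1 = (((arr.length - 1 : Nat) : Nat) : Int) := by
    omega
  have hB : bLoop arr.length arr ((arr.length : Int) - 1) 0
      = 0 + specF arr (arr.length - 1) := by
    rw [hcast]
    exact bLoop_eq arr.length (arr.length - 1) arr 0 (by omega) (by omega)
  rw [hA, hB]
  ring
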